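-- pv_equiv track=rewrite | github.com/ethanglaser/ci-monitor | ci_tools/log_parser.py | _extract_step_section
-- ===== SOURCE A (Python) =====
-- def _extract_step_section(lines, step_name):
--     """Extract lines belonging to a specific step.
--
--     Handles both GitHub Actions (##[group]) and Azure Pipelines (##[section])
--     markers.
--     """
--     in_section = False
--     section_lines = []
--     step_lower = step_name.lower()
--
--     for line in lines:
--         if ("##[group]" in line or "##[section]" in line) and step_lower in line.lower():
--             in_section = True
--             section_lines = []
--             continue
--         if in_section and ("##[group]" in line or "##[section]" in line):
--             break
--         if in_section:
--             section_lines.append(line)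
--
--     return section_lines if section_lines else None
-- ===== SOURCE B (Python) =====
-- def _extract_step_section(lines, step_name):
--     """Segment-based re-implementation: locate the first matching marker, then
--     repeatedly take the run of lines up to the next marker, restarting after
--     that marker whenever it also matches the step name."""
--     step_lower = step_name.lower()
--
--     def is_marker(line):
--         return "##[group]" in line or "##[section]" in line
--
--     def is_match(line):
--         return is_marker(line) and step_lower in line.lower()
--
--     rest = None
--     for i, line in enumerate(lines):
--         if is_match(line):
--             rest = lines[i + 1:]
--             break
--     if rest is None:
--         return None
--
--     while True:
--         body = []
--         k = 0
--         for line in rest: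
--             if is_marker(line):
--                 break
--             body.append(line)
--             k += 1
--         tail = rest[k:]
--         if tail and is_match(tail[0]):
--             rest = tail[1:]
--             continue
--         return body if body else None
-- ===== Notes on version B (the rewrite author's own statement) =====
-- stated objective: alternative
-- what changed: Replaced the flag-and-accumulator toggling pass with a boundary decomposition: find the first matching marker, then repeatedly take the segment up to the next marker and restart after it when that marker also matches.
import Mathlib
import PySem

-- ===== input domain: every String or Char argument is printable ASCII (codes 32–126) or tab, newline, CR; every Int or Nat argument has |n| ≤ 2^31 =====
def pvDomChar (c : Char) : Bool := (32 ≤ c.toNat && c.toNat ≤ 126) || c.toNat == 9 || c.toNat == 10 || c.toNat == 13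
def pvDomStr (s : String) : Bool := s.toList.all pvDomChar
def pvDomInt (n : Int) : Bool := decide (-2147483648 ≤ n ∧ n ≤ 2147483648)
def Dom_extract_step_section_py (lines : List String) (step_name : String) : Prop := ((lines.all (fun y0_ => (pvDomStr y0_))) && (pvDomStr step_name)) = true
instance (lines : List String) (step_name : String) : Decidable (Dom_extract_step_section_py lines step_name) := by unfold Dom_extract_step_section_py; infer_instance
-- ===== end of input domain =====

-- B replaces A's flag-and-accumulator toggling pass by a boundary decomposition
-- (find the first matching marker, then take segments between markers, restarting
-- after a matching marker); same cost, different structure.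


-- shared transliterations of the Python boolean tests ("x in s" is PySem.Str.isIn)
def pvIsMarker (line : String) : Bool :=
  PySem.Str.isIn "##[group]" line || PySem.Str.isIn "##[section]" line

def pvIsMatch (step_lower line : String) : Bool :=
  pvIsMarker line && PySem.Str.isIn step_lower (PySem.Str.lower line)

-- ===== PORT A =====
-- A's for-loop with its two pieces of state (in_section, section_lines)
def pvLoopA (step_lower : String) : List String → Bool → List String → List String
  | [], _, section_lines => section_lines
  | line :: rest, in_section, section_lines =>
    if pvIsMatch step_lower line then pvLoopA step_lower rest true []
    else if in_section && pvIsMarker line then section_lines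
    else if in_section then pvLoopA step_lower rest in_section (section_lines ++ [line])
    else pvLoopA step_lower rest in_section section_lines

def extract_step_section_py (lines : List String) (step_name : String) : Option (List String) :=
  let step_lower := PySem.Str.lower step_name
  let section_lines := pvLoopA step_lower lines false []
  if section_lines = [] then none else some section_lines

-- ===== PORT B =====
-- B's first loop: lines after the first matching marker (none if there is none)
def pvFindStart (step_lower : String) : List String → Option (List String)
  | [] => none
  | line :: rest => if pvIsMatch step_lower line then some rest else pvFindStart step_lower rest

-- B's while-loop: take the segment up to the next marker; restart after a matching marker
def pvGoB (step_lower : String) (rest : List String) : List String :=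
  let body := rest.takeWhile (fun l => !pvIsMarker l)
  match h : rest.dropWhile (fun l => !pvIsMarker l) with
  | [] => body
  | m :: ms => if pvIsMatch step_lower m then pvGoB step_lower ms else body
termination_by rest.length
decreasing_by
  have h1 : (rest.dropWhile (fun l => !pvIsMarker l)).length ≤ rest.length :=
    List.length_dropWhile_le _ _
  rw [h] at h1; simp at h1; omega

def extract_step_section_py_alt (lines : List String) (step_name : String) : Option (List String) :=
  let step_lower := PySem.Str.lower step_name
  match pvFindStart step_lower lines with
  | none => none
  | some rest =>
    let body := pvGoB step_lower rest
    if body = [] then none else some body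

-- ===== PRECONDITION & SPEC =====
def Spec_extract_step_section_py (lines : List String) (step_name : String) (out : Option (List String)) : Prop := out = extract_step_section_py_alt lines step_name
instance (lines : List String) (step_name : String) (out : Option (List String)) : Decidable (Spec_extract_step_section_py lines step_name out) := by unfold Spec_extract_step_section_py; infer_instance

-- ===== CLAIM (what is proved, stated in full; the proofs are below) =====
def Claim_equal_extract_step_section_py : Prop := ∀ (lines : List String) (step_name : String), Dom_extract_step_section_py lines step_name → Spec_extract_step_section_py lines step_name (extract_step_section_py lines step_name)

-- ===== LEMMAS AND PROOFS =====

theorem pvGoB_eq (sl : String) (rest : List String) :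
    pvGoB sl rest = match rest.dropWhile (fun l => !pvIsMarker l) with
      | [] => rest.takeWhile (fun l => !pvIsMarker l)
      | m :: ms => if pvIsMatch sl m then pvGoB sl ms else rest.takeWhile (fun l => !pvIsMarker l) := by
  rw [pvGoB]
  split
  · next h => rw [h]
  · next m ms h => rw [h]

-- does the first marker line of ls match?
def pvFMM (step_lower : String) : List String → Bool
  | [] => false
  | l :: ls => if pvIsMarker l then pvIsMatch step_lower l else pvFMM step_lower ls

theorem pvFMM_eq_dropWhile (sl : String) (ls : List String) :
    pvFMM sl ls = match ls.dropWhile (fun l => !pvIsMarker l) with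
      | [] => false
      | m :: _ => pvIsMatch sl m := by
  induction ls with
  | nil => simp [pvFMM]
  | cons l ls ih =>
    by_cases h : pvIsMarker l = true
    · simp [pvFMM, h, List.dropWhile_cons]
    · simp only [Bool.not_eq_true] at h
      simp [pvFMM, h, List.dropWhile_cons, ih]

theorem pvGoB_cons_nonmarker (sl l : String) (ls : List String) (h : pvIsMarker l = false) :
    pvGoB sl (l :: ls) = if pvFMM sl ls then pvGoB sl ls else l :: pvGoB sl ls := by
  rw [pvGoB_eq sl (l :: ls), pvGoB_eq sl ls, pvFMM_eq_dropWhile]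
  cases hd : ls.dropWhile (fun l => !pvIsMarker l) with
  | nil => simp [List.takeWhile_cons, List.dropWhile_cons, h, hd]
  | cons m ms =>
    by_cases hm : pvIsMatch sl m = true
    · simp [List.takeWhile_cons, List.dropWhile_cons, h, hd, hm]
    · simp only [Bool.not_eq_true] at hm
      simp [List.takeWhile_cons, List.dropWhile_cons, h, hd, hm]

theorem pvGoB_cons_marker_match (sl l : String) (ls : List String)
    (hmk : pvIsMarker l = true) (hmt : pvIsMatch sl l = true) :
    pvGoB sl (l :: ls) = pvGoB sl ls := by
  rw [pvGoB_eq sl (l :: ls)]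
  simp [List.takeWhile_cons, List.dropWhile_cons, hmk, hmt]

theorem pvGoB_cons_marker_nomatch (sl l : String) (ls : List String)
    (hmk : pvIsMarker l = true) (hmt : pvIsMatch sl l = false) :
    pvGoB sl (l :: ls) = [] := by
  rw [pvGoB_eq sl (l :: ls)]
  simp [List.takeWhile_cons, List.dropWhile_cons, hmk, hmt]

theorem pvLoopA_true (sl : String) (ls : List String) :
    ∀ acc, pvLoopA sl ls true acc =
      if pvFMM sl ls then pvGoB sl ls else acc ++ pvGoB sl ls := by
  induction ls with
  | nil =>
    intro acc
    rw [pvGoB_eq]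
    simp [pvLoopA, pvFMM]
  | cons l ls ih =>
    intro acc
    by_cases hmt : pvIsMatch sl l = true
    · have hmk : pvIsMarker l = true := by
        have h2 := hmt
        unfold pvIsMatch at h2
        exact (Bool.and_eq_true _ _ ▸ h2).1
      have hfmm : pvFMM sl (l :: ls) = true := by simp [pvFMM, hmk, hmt]
      rw [pvLoopA, hfmm]
      simp only [hmt, if_true, ih, pvGoB_cons_marker_match sl l ls hmk hmt]
      split <;> simp
    · simp only [Bool.not_eq_true] at hmt
      by_cases hmk : pvIsMarker l = true
      · have hfmm : pvFMM sl (l :: ls) = false := by simp [pvFMM, hmk, hmt]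
        rw [pvLoopA, hfmm]
        simp [hmt, hmk, pvGoB_cons_marker_nomatch sl l ls hmk hmt]
      · simp only [Bool.not_eq_true] at hmk
        have hfmm : pvFMM sl (l :: ls) = pvFMM sl ls := by simp [pvFMM, hmk]
        rw [pvLoopA, hfmm]
        simp only [hmt, hmk, Bool.and_false, if_false, Bool.false_eq_true, if_true, ih,
          pvGoB_cons_nonmarker sl l ls hmk]
        by_cases hp : pvFMM sl ls = true
        · simp [hp]
        · simp only [Bool.not_eq_true] at hp
          simp [hp]

theorem pvLoopA_false (sl : String) (ls : List String) :
    pvLoopA sl ls false [] = match pvFindStart sl ls with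
      | none => []
      | some rest => pvLoopA sl rest true [] := by
  induction ls with
  | nil => simp [pvLoopA, pvFindStart]
  | cons l ls ih =>
    by_cases hmt : pvIsMatch sl l = true
    · rw [pvLoopA]; simp [hmt, pvFindStart]
    · simp only [Bool.not_eq_true] at hmt
      rw [pvLoopA]; simp [hmt, pvFindStart, ih]

-- ===== VERDICT (by name: the statement is the Claim_ definition above) =====
theorem extract_step_section_py_spec : Claim_equal_extract_step_section_py := by
  intro lines step_name _
  unfold Spec_extract_step_section_py extract_step_section_py extract_step_section_py_alt
  dsimp only
  rw [pvLoopA_false]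
  cases hfs : pvFindStart (PySem.Str.lower step_name) lines with
  | none => simp
  | some rest =>
    dsimp only
    simp only [pvLoopA_true]
    split <;> simp
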